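-- pv_equiv track=rewrite | github.com/m-shalll/AU-Task2 | Task3.py | format_string
-- ===== SOURCE A (Python) =====
-- def format_string(s, operations):
--     def lower(text):
--         return text.lower()
--     def upper(text):
--         return text.upper()
--     def reverse(text):
--         return text[::-1]
--     for operation in operations:
--         if operation.lower()=="reverse":
--             s=reverse(s)
--         elif operation.lower()=="minimize":
--             s=lower(s)
--         elif operation.lower()=="uppercase":
--             s=upper(s)
--     return s
--
-- s = "hello world"
--
-- operations = ['Uppercase', 'ReVerse']
-- ===== SOURCE B (Python) =====
-- def format_string(s, operations):
--     # One pass over the operations collecting reverse-parity and the last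
--     # case-changing operation (case changes commute with reversal and the
--     # last one wins), then at most two passes over s.
--     reverse_parity = False
--     case_op = None
--     for op in operations:
--         o = op.lower()
--         if o == "reverse":
--             reverse_parity = not reverse_parity
--         elif o == "minimize" or o == "uppercase":
--             case_op = o
--     if case_op == "minimize":
--         s = s.lower()
--     elif case_op == "uppercase":
--         s = s.upper()
--     if reverse_parity:
--         s = s[::-1]
--     return s
-- ===== Notes on version B (the rewrite author's own statement) =====
-- stated objective: alternative
-- what changed: Instead of transforming the string at every operation, B scans the operation list once collecting the reverse parity and the last case operation (case changes commute with reversal and the last one wins), then applies at most one case pass and one reversal to s.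
import Mathlib
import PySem

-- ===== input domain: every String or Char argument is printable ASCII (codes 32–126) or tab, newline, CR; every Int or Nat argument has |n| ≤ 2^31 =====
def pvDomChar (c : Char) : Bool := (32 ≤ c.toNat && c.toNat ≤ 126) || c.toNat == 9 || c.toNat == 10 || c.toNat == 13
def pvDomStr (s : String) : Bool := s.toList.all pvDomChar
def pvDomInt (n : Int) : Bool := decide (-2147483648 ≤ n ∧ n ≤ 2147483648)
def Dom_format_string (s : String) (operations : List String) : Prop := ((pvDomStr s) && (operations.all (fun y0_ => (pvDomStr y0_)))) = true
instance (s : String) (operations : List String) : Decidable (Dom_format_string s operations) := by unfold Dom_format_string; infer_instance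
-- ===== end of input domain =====

-- B replaces A's per-operation string transforms by one scan over the operations
-- (reverse parity + last case op) followed by at most two passes over s (alternative algorithm).

-- ===== PORT A =====
-- A: fold over the operations, transforming s at each recognised operation.
-- s[::-1] is PySem.Str.slice? s none none (-1); step -1 never yields none (.getD t is unreachable).
def format_string (s : String) (operations : List String) : String :=
  operations.foldl (fun t operation =>
    if PySem.Str.lower operation = "reverse" then
      (PySem.Str.slice? t none none (-1)).getD t
    else if PySem.Str.lower operation = "minimize" then
      PySem.Str.lower t
    else if PySem.Str.lower operation = "uppercase" then
      PySem.Str.upper t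
    else t) s

-- ===== PORT B =====
-- B's scan over the operations: accumulate (reverse parity, last case op, lowered).
def fsFlagsStep (acc : Bool × Option String) (op : String) : Bool × Option String :=
  let o := PySem.Str.lower op
  if o = "reverse" then (!acc.1, acc.2)
  else if o = "minimize" ∨ o = "uppercase" then (acc.1, some o)
  else acc

-- Source B's s[::-1] ported as list reversal (exact: PySem.Str.slice?_none_none_neg_one).
def format_string_alt (s : String) (operations : List String) : String :=
  let flags := operations.foldl fsFlagsStep (false, none)
  let s1 := match flags.2 with
    | some o => if o = "minimize" then PySem.Str.lower s else PySem.Str.upper s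
    | none => s
  if flags.1 then String.ofList s1.toList.reverse else s1

-- ===== PRECONDITION & SPEC =====
def Spec_format_string (s : String) (operations : List String) (out : String) : Prop := out = format_string_alt s operations
instance (s : String) (operations : List String) (out : String) : Decidable (Spec_format_string s operations out) := by unfold Spec_format_string; infer_instance

-- ===== CLAIM (what is proved, stated in full; the proofs are below) =====
def Claim_equal_format_string : Prop := ∀ (s : String) (operations : List String), Dom_format_string s operations → Spec_format_string s operations (format_string s operations)

-- ===== LEMMAS AND PROOFS =====

-- Char-level facts about Python's per-character case maps.
lemma charle (a c : Char) : (a ≤ c) ↔ a.toNat ≤ c.toNat := by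
  rw [Char.le_def, UInt32.le_iff_toNat_le]; rfl

lemma toNat_ofNat' (n : Nat) (h : n < 55296) : (Char.ofNat n).toNat = n := by
  have : n.isValidChar := Or.inl h
  simp only [Char.ofNat, dif_pos this]
  rfl

lemma lowerChar_of_upper (c : Char) (h1 : 65 ≤ c.toNat) (h2 : c.toNat ≤ 90) :
    PySem.Chars.lowerChar c = Char.ofNat (c.toNat + 32) := by
  simp only [PySem.Chars.lowerChar, PySem.Chars.isupper]
  rw [if_pos]
  simp only [Bool.and_eq_true, decide_eq_true_eq, charle]
  exact ⟨h1, h2⟩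

lemma lowerChar_of_not_upper (c : Char) (h : ¬ (65 ≤ c.toNat ∧ c.toNat ≤ 90)) :
    PySem.Chars.lowerChar c = c := by
  simp only [PySem.Chars.lowerChar, PySem.Chars.isupper]
  rw [if_neg]
  simp only [Bool.and_eq_true, decide_eq_true_eq, charle]
  exact h

lemma upperChar_of_lower (c : Char) (h1 : 97 ≤ c.toNat) (h2 : c.toNat ≤ 122) :
    PySem.Chars.upperChar c = Char.ofNat (c.toNat - 32) := by
  simp only [PySem.Chars.upperChar, PySem.Chars.islower]
  rw [if_pos]
  simp only [Bool.and_eq_true, decide_eq_true_eq, charle]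
  exact ⟨h1, h2⟩

lemma upperChar_of_not_lower (c : Char) (h : ¬ (97 ≤ c.toNat ∧ c.toNat ≤ 122)) :
    PySem.Chars.upperChar c = c := by
  simp only [PySem.Chars.upperChar, PySem.Chars.islower]
  rw [if_neg]
  simp only [Bool.and_eq_true, decide_eq_true_eq, charle]
  exact h

lemma lowerChar_upperChar (c : Char) :
    PySem.Chars.lowerChar (PySem.Chars.upperChar c) = PySem.Chars.lowerChar c := by
  by_cases h : 97 ≤ c.toNat ∧ c.toNat ≤ 122
  · rw [upperChar_of_lower c h.1 h.2,
        lowerChar_of_upper _ (by rw [toNat_ofNat' _ (by omega)]; omega) (by rw [toNat_ofNat' _ (by omega)]; omega),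
        lowerChar_of_not_upper c (by omega), toNat_ofNat' _ (by omega)]
    have : c.toNat - 32 + 32 = c.toNat := by omega
    rw [this]
    exact Char.ofNat_toNat c
  · rw [upperChar_of_not_lower c h]

lemma upperChar_lowerChar (c : Char) :
    PySem.Chars.upperChar (PySem.Chars.lowerChar c) = PySem.Chars.upperChar c := by
  by_cases h : 65 ≤ c.toNat ∧ c.toNat ≤ 90
  · rw [lowerChar_of_upper c h.1 h.2,
        upperChar_of_lower _ (by rw [toNat_ofNat' _ (by omega)]; omega) (by rw [toNat_ofNat' _ (by omega)]; omega),
        upperChar_of_not_lower c (by omega), toNat_ofNat' _ (by omega)]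
    have : c.toNat + 32 - 32 = c.toNat := by omega
    rw [this]
    exact Char.ofNat_toNat c
  · rw [lowerChar_of_not_upper c h]

lemma lowerChar_lowerChar (c : Char) :
    PySem.Chars.lowerChar (PySem.Chars.lowerChar c) = PySem.Chars.lowerChar c := by
  by_cases h : 65 ≤ c.toNat ∧ c.toNat ≤ 90
  · rw [lowerChar_of_upper c h.1 h.2]
    rw [lowerChar_of_not_upper _ (by rw [toNat_ofNat' _ (by omega)]; omega)]
  · rw [lowerChar_of_not_upper c h]; exact lowerChar_of_not_upper c h

lemma upperChar_upperChar (c : Char) :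
    PySem.Chars.upperChar (PySem.Chars.upperChar c) = PySem.Chars.upperChar c := by
  by_cases h : 97 ≤ c.toNat ∧ c.toNat ≤ 122
  · rw [upperChar_of_lower c h.1 h.2]
    rw [upperChar_of_not_lower _ (by rw [toNat_ofNat' _ (by omega)]; omega)]
  · rw [upperChar_of_not_lower c h]; exact upperChar_of_not_lower c h

-- String-level facts.
lemma str_ext (a b : String) (h : a.toList = b.toList) : a = b := by
  have := congrArg String.ofList h; simpa using this

def strRev (s : String) : String := String.ofList s.toList.reverse

lemma strRev_strRev (s : String) : strRev (strRev s) = s := by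
  apply str_ext; simp [strRev]

lemma lower_strRev (s : String) : PySem.Str.lower (strRev s) = strRev (PySem.Str.lower s) := by
  apply str_ext; simp [strRev, PySem.Chars.lower]

lemma upper_strRev (s : String) : PySem.Str.upper (strRev s) = strRev (PySem.Str.upper s) := by
  apply str_ext; simp [strRev, PySem.Chars.upper]

lemma lower_upper (s : String) : PySem.Str.lower (PySem.Str.upper s) = PySem.Str.lower s := by
  apply str_ext
  simp [PySem.Chars.lower, PySem.Chars.upper, lowerChar_upperChar]

lemma upper_lower (s : String) : PySem.Str.upper (PySem.Str.lower s) = PySem.Str.upper s := by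
  apply str_ext
  simp [PySem.Chars.lower, PySem.Chars.upper, upperChar_lowerChar]

lemma lower_lower (s : String) : PySem.Str.lower (PySem.Str.lower s) = PySem.Str.lower s := by
  apply str_ext
  simp [PySem.Chars.lower, lowerChar_lowerChar]

lemma upper_upper (s : String) : PySem.Str.upper (PySem.Str.upper s) = PySem.Str.upper s := by
  apply str_ext
  simp [PySem.Chars.upper, upperChar_upperChar]

-- The state B's flags denote, as a transform of s.
def applyCase (c : Option String) (s : String) : String :=
  match c with
  | some o => if o = "minimize" then PySem.Str.lower s else PySem.Str.upper s
  | none => s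

def applyFlags (f : Bool × Option String) (s : String) : String :=
  if f.1 then strRev (applyCase f.2 s) else applyCase f.2 s

lemma alt_eq_applyFlags (s : String) (operations : List String) :
    format_string_alt s operations = applyFlags (operations.foldl fsFlagsStep (false, none)) s := by
  unfold format_string_alt applyFlags applyCase strRev
  rcases h : (operations.foldl fsFlagsStep (false, none)) with ⟨p, c⟩
  cases c <;> simp

lemma lower_applyCase (c : Option String) (s : String) :
    PySem.Str.lower (applyCase c s) = PySem.Str.lower s := by
  cases c with
  | none => rfl
  | some o =>
    simp only [applyCase]
    split_ifs <;> [exact lower_lower s; exact lower_upper s]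

lemma upper_applyCase (c : Option String) (s : String) :
    PySem.Str.upper (applyCase c s) = PySem.Str.upper s := by
  cases c with
  | none => rfl
  | some o =>
    simp only [applyCase]
    split_ifs <;> [exact upper_lower s; exact upper_upper s]

lemma applyCase_minimize (s : String) : applyCase (some "minimize") s = PySem.Str.lower s := by
  simp [applyCase]

lemma applyCase_uppercase (s : String) : applyCase (some "uppercase") s = PySem.Str.upper s := by
  simp [applyCase]

-- A's single step, named for the induction.
def fsStepA (t : String) (operation : String) : String :=
  if PySem.Str.lower operation = "reverse" then
    (PySem.Str.slice? t none none (-1)).getD t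
  else if PySem.Str.lower operation = "minimize" then
    PySem.Str.lower t
  else if PySem.Str.lower operation = "uppercase" then
    PySem.Str.upper t
  else t

lemma stepA_reverse (t : String) (op : String) (h : PySem.Str.lower op = "reverse") :
    fsStepA t op = strRev t := by
  unfold fsStepA
  rw [if_pos h, PySem.Str.slice?_none_none_neg_one]
  rfl

-- The key commuting step: doing A's operation on the denoted state = updating the flags.
lemma step_commute (f : Bool × Option String) (op : String) (s : String) :
    fsStepA (applyFlags f s) op = applyFlags (fsFlagsStep f op) s := by
  rcases f with ⟨p, c⟩
  by_cases hr : PySem.Str.lower op = "reverse"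
  · rw [stepA_reverse _ _ hr]
    unfold fsFlagsStep applyFlags
    rw [if_pos hr]
    cases p <;> simp [strRev_strRev]
  · by_cases hm : PySem.Str.lower op = "minimize"
    · unfold fsStepA fsFlagsStep applyFlags
      rw [if_neg hr, if_pos hm, if_neg hr, if_pos (Or.inl hm), hm]
      cases p <;> simp [lower_strRev, lower_applyCase, applyCase_minimize]
    · by_cases hu : PySem.Str.lower op = "uppercase"
      · unfold fsStepA fsFlagsStep applyFlags
        rw [if_neg hr, if_neg hm, if_pos hu, if_neg hr, if_pos (Or.inr hu), hu]
        cases p <;> simp [upper_strRev, upper_applyCase, applyCase_uppercase]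
      · have hnc : ¬(PySem.Str.lower op = "minimize" ∨ PySem.Str.lower op = "uppercase") := by
          tauto
        unfold fsStepA fsFlagsStep
        rw [if_neg hr, if_neg hm, if_neg hu, if_neg hr, if_neg hnc]

lemma fold_eq (operations : List String) :
    ∀ (f : Bool × Option String) (s : String),
      operations.foldl fsStepA (applyFlags f s) = applyFlags (operations.foldl fsFlagsStep f) s := by
  induction operations with
  | nil => intro f s; rfl
  | cons op rest ih =>
    intro f s
    simp only [List.foldl_cons]
    rw [step_commute f op s, ih]

lemma a_eq_foldl (s : String) (operations : List String) :
    format_string s operations = operations.foldl fsStepA s := rfl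

-- ===== VERDICT (by name: the statement is the Claim_ definition above) =====
theorem format_string_spec : Claim_equal_format_string := by
  intro s operations _
  unfold Spec_format_string
  rw [a_eq_foldl, alt_eq_applyFlags]
  have h := fold_eq operations (false, none) s
  have h0 : applyFlags (false, none) s = s := rfl
  rw [h0] at h
  exact h
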